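-- pv_equiv track=rewrite | github.com/awales0177/test_data | test.py | merge_types
-- ===== SOURCE A (Python) =====
-- from typing import Any, Dict, List, Optional, Sequence, Set, Tuple
--
-- def merge_types(types: Sequence[str]) -> str:
--     non_null = [t for t in types if t != "null"]
--     if not non_null:
--         return "TEXT"
--     if all(t == "bool" for t in non_null):
--         return "BOOLEAN"
--     if all(t == "int" for t in non_null):
--         return "BIGINT"
--     if all(t in ("int", "float") for t in non_null):
--         return "DOUBLE PRECISION"
--     if all(t == "float" for t in non_null):
--         return "DOUBLE PRECISION"
--     if all(t == "str" for t in non_null):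
--         return "TEXT"
--     if any(t == "jsonb" for t in non_null):
--         return "JSONB"
--     # mixed scalars (e.g. int + str)
--     return "TEXT"
-- ===== SOURCE B (Python) =====
-- def merge_types(types):
--     # single left-to-right pass: classify each element into a lattice code and
--     # combine with an associative join; map the final lattice element to SQL.
--     NULL, BOOL, INT, FLOAT, NUM, STR, JSONB, MIXED = 0, 1, 2, 3, 4, 5, 6, 7
--
--     def classify(t):
--         if t == "null":
--             return NULL
--         if t == "bool":
--             return BOOL
--         if t == "int":
--             return INT
--         if t == "float":
--             return FLOAT
--         if t == "str":
--             return STR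
--         if t == "jsonb":
--             return JSONB
--         return MIXED
--
--     def join(a, b):
--         if a == NULL:
--             return b
--         if b == NULL:
--             return a
--         if a == JSONB or b == JSONB:
--             return JSONB
--         if a == b:
--             return a
--         if a in (INT, FLOAT, NUM) and b in (INT, FLOAT, NUM):
--             return NUM
--         return MIXED
--
--     acc = NULL
--     for t in types:
--         acc = join(acc, classify(t))
--     if acc == BOOL:
--         return "BOOLEAN"
--     if acc == INT:
--         return "BIGINT"
--     if acc in (FLOAT, NUM):
--         return "DOUBLE PRECISION"
--     if acc == JSONB:
--         return "JSONB"
--     return "TEXT"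
-- ===== Notes on version B (the rewrite author's own statement) =====
-- stated objective: alternative
-- what changed: Replaces A's seven staged all()/any() scans of the filtered list by a single left-to-right fold over a small join-semilattice: each element is classified into a lattice code (null/bool/int/float/str/jsonb/mixed), codes are combined with an associative join, and only the final lattice element is mapped to a SQL type.
import Mathlib
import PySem

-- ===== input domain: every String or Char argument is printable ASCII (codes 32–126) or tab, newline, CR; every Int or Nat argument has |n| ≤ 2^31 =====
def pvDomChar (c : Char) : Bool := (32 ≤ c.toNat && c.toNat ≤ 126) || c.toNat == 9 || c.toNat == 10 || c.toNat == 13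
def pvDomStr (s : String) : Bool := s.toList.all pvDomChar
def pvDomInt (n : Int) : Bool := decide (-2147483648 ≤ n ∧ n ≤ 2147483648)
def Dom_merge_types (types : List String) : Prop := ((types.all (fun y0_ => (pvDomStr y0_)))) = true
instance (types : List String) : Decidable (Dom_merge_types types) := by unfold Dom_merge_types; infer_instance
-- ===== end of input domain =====

-- B replaces A's staged all()/any() scans by a single fold over a small join-semilattice
-- of type codes (objective: alternative, one pass with an accumulator).


-- ===== PORT A =====
def merge_types (types : List String) : String :=
  let non_null := types.filter (fun t => t != "null")
  if non_null.isEmpty then "TEXT"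
  else if non_null.all (fun t => t == "bool") then "BOOLEAN"
  else if non_null.all (fun t => t == "int") then "BIGINT"
  else if non_null.all (fun t => t == "int" || t == "float") then "DOUBLE PRECISION"
  else if non_null.all (fun t => t == "float") then "DOUBLE PRECISION"
  else if non_null.all (fun t => t == "str") then "TEXT"
  else if non_null.any (fun t => t == "jsonb") then "JSONB"
  else "TEXT"

-- ===== PORT B =====
-- lattice codes: 0 NULL, 1 BOOL, 2 INT, 3 FLOAT, 4 NUM, 5 STR, 6 JSONB, 7 MIXED
def pvClassify (t : String) : Int :=
  if t == "null" then 0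
  else if t == "bool" then 1
  else if t == "int" then 2
  else if t == "float" then 3
  else if t == "str" then 5
  else if t == "jsonb" then 6
  else 7

def pvJoin (a b : Int) : Int :=
  if a == 0 then b
  else if b == 0 then a
  else if a == 6 || b == 6 then 6
  else if a == b then a
  else if (a == 2 || a == 3 || a == 4) && (b == 2 || b == 3 || b == 4) then 4
  else 7

def merge_types_alt (types : List String) : String :=
  let acc := types.foldl (fun a t => pvJoin a (pvClassify t)) 0
  if acc == 1 then "BOOLEAN"
  else if acc == 2 then "BIGINT"
  else if acc == 3 || acc == 4 then "DOUBLE PRECISION"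
  else if acc == 6 then "JSONB"
  else "TEXT"

-- ===== PRECONDITION & SPEC =====
def Spec_merge_types (types : List String) (out : String) : Prop := out = merge_types_alt types
instance (types : List String) (out : String) : Decidable (Spec_merge_types types out) := by unfold Spec_merge_types; infer_instance

-- ===== CLAIM (what is proved, stated in full; the proofs are below) =====
def Claim_equal_merge_types : Prop := ∀ (types : List String), Dom_merge_types types → Spec_merge_types types (merge_types types)

-- ===== LEMMAS AND PROOFS =====

-- presence flags of the six non-null categories
def fB (l : List String) : Bool := l.any (fun t => t == "bool")
def fI (l : List String) : Bool := l.any (fun t => t == "int")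
def fF (l : List String) : Bool := l.any (fun t => t == "float")
def fS (l : List String) : Bool := l.any (fun t => t == "str")
def fJ (l : List String) : Bool := l.any (fun t => t == "jsonb")
def fO (l : List String) : Bool :=
  l.any (fun t => !(t == "null" || t == "bool" || t == "int" || t == "float" || t == "str" || t == "jsonb"))

-- the fold result as a function of the presence flags
def canon (b i f s j o : Bool) : Int :=
  if j then 6
  else if o then 7
  else if b then (if i || f || s then 7 else 1)
  else if s then (if i || f then 7 else 5)
  else if i then (if f then 4 else 2)
  else if f then 3
  else 0

def CATS : List Int := [0, 1, 2, 3, 4, 5, 6, 7]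

def CATC : List Int := [0, 1, 2, 3, 5, 6, 7]

theorem join_mem : ∀ a ∈ CATS, ∀ c ∈ CATC, pvJoin a c ∈ CATS := by decide

theorem classify_mem (t : String) : pvClassify t ∈ CATC := by
  unfold pvClassify CATC; split_ifs <;> simp

-- the step law of the fold, one instance per classify output
theorem step_law : ∀ c ∈ CATC, ∀ a ∈ CATS, ∀ b i f s j o : Bool,
    pvJoin (pvJoin a c) (canon b i f s j o) =
      pvJoin a (canon (b || (c == 1)) (i || (c == 2)) (f || (c == 3))
                      (s || (c == 5)) (j || (c == 6)) (o || (c == 7))) := by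
  decide

theorem fold_canon (l : List String) : ∀ a ∈ CATS,
    l.foldl (fun a t => pvJoin a (pvClassify t)) a =
      pvJoin a (canon (fB l) (fI l) (fF l) (fS l) (fJ l) (fO l)) := by
  induction l with
  | nil =>
      intro a ha
      by_cases h : a = 0 <;> simp [fB, fI, fF, fS, fJ, fO, canon, pvJoin, h]
  | cons t ts ih =>
      intro a ha
      have hc := classify_mem t
      have h1 : ts.foldl (fun a t => pvJoin a (pvClassify t)) (pvJoin a (pvClassify t)) =
          pvJoin (pvJoin a (pvClassify t)) (canon (fB ts) (fI ts) (fF ts) (fS ts) (fJ ts) (fO ts)) :=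
        ih _ (join_mem a ha _ hc)
      have hflags : fB (t :: ts) = ((pvClassify t == 1) || fB ts) ∧
          fI (t :: ts) = ((pvClassify t == 2) || fI ts) ∧
          fF (t :: ts) = ((pvClassify t == 3) || fF ts) ∧
          fS (t :: ts) = ((pvClassify t == 5) || fS ts) ∧
          fJ (t :: ts) = ((pvClassify t == 6) || fJ ts) ∧
          fO (t :: ts) = ((pvClassify t == 7) || fO ts) := by
        unfold fB fI fF fS fJ fO pvClassify
        split_ifs <;> simp_all
      obtain ⟨e1, e2, e3, e4, e5, e6⟩ := hflags
      calc (t :: ts).foldl (fun a t => pvJoin a (pvClassify t)) a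
          = pvJoin (pvJoin a (pvClassify t)) (canon (fB ts) (fI ts) (fF ts) (fS ts) (fJ ts) (fO ts)) := by
            simpa [List.foldl] using h1
        _ = pvJoin a (canon (fB ts || (pvClassify t == 1)) (fI ts || (pvClassify t == 2))
              (fF ts || (pvClassify t == 3)) (fS ts || (pvClassify t == 5))
              (fJ ts || (pvClassify t == 6)) (fO ts || (pvClassify t == 7))) :=
            step_law _ hc a ha _ _ _ _ _ _
        _ = pvJoin a (canon (fB (t :: ts)) (fI (t :: ts)) (fF (t :: ts)) (fS (t :: ts))
              (fJ (t :: ts)) (fO (t :: ts))) := by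
            rw [e1, e2, e3, e4, e5, e6]; simp [Bool.or_comm]

-- A's branch conditions as Boolean functions of the flags
theorem A_flags (l : List String) :
    ((l.filter (fun t => t != "null")).isEmpty
        = !(fB l || fI l || fF l || fS l || fJ l || fO l)) ∧
    ((l.filter (fun t => t != "null")).all (fun t => t == "bool")
        = !(fI l || fF l || fS l || fJ l || fO l)) ∧
    ((l.filter (fun t => t != "null")).all (fun t => t == "int")
        = !(fB l || fF l || fS l || fJ l || fO l)) ∧
    ((l.filter (fun t => t != "null")).all (fun t => t == "int" || t == "float")
        = !(fB l || fS l || fJ l || fO l)) ∧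
    ((l.filter (fun t => t != "null")).all (fun t => t == "float")
        = !(fB l || fI l || fS l || fJ l || fO l)) ∧
    ((l.filter (fun t => t != "null")).all (fun t => t == "str")
        = !(fB l || fI l || fF l || fJ l || fO l)) ∧
    ((l.filter (fun t => t != "null")).any (fun t => t == "jsonb") = fJ l) := by
  induction l with
  | nil => simp [fB, fI, fF, fS, fJ, fO]
  | cons t ts ih =>
      obtain ⟨i1, i2, i3, i4, i5, i6, i7⟩ := ih
      unfold fB fI fF fS fJ fO at *
      by_cases h0 : t = "null"
      · subst h0; simp_all [List.any_cons]
      by_cases h1 : t = "bool"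
      · subst h1; simp_all [List.any_cons]
      by_cases h2 : t = "int"
      · subst h2; simp_all [List.any_cons]
      by_cases h3 : t = "float"
      · subst h3; simp_all [List.any_cons]
      by_cases h4 : t = "str"
      · subst h4; simp_all [List.any_cons]
      by_cases h5 : t = "jsonb"
      · subst h5; simp_all [List.any_cons]
      have b0 : (t == "null") = false := by simp [h0]
      have b1 : (t == "bool") = false := by simp [h1]
      have b2 : (t == "int") = false := by simp [h2]
      have b3 : (t == "float") = false := by simp [h3]
      have b4 : (t == "str") = false := by simp [h4]
      have b5 : (t == "jsonb") = false := by simp [h5]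
      simp only [List.filter_cons, List.any_cons, b0, b1, b2, b3, b4, b5]
      simp_all

-- ===== VERDICT (by name: the statement is the Claim_ definition above) =====
theorem merge_types_spec : Claim_equal_merge_types := by
  intro l _
  unfold Spec_merge_types merge_types merge_types_alt
  obtain ⟨e1, e2, e3, e4, e5, e6, e7⟩ := A_flags l
  have hf := fold_canon l 0 (by decide)
  simp only [e1, e2, e3, e4, e5, e6, e7, hf]
  generalize fB l = b; generalize fI l = i; generalize fF l = f
  generalize fS l = s; generalize fJ l = j; generalize fO l = o
  revert b i f s j o; decide
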